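-- pv_equiv track=rewrite | github.com/milkey-mouse/lessonline | life.py | longest_horizontal
-- ===== SOURCE A (Python) =====
-- def longest_horizontal(t):
--     max_length = 0
--     for row in t:
--         current_length = 0
--         for cell in row:
--             if cell == 1:
--                 current_length += 1
--                 max_length = max(max_length, current_length)
--             else:
--                 current_length = 0
--     return max_length
-- ===== SOURCE B (Python) =====
-- def longest_horizontal(t):
--     best = 0
--     for row in t:
--         bounds = [i for i, c in enumerate(row) if c != 1]
--         for a, b in zip([-1] + bounds, bounds + [len(row)]):
--             best = max(best, b - a - 1)
--     return best
-- ===== Notes on version B (the rewrite author's own statement) =====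
-- stated objective: alternative
-- what changed: Instead of A's running counter that resets on non-1 cells, B collects per row the indices of all non-1 'blocker' cells and takes the maximum gap between consecutive blockers (with -1 and len(row) as sentinels), which is the longest run of 1s.
import Mathlib
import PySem

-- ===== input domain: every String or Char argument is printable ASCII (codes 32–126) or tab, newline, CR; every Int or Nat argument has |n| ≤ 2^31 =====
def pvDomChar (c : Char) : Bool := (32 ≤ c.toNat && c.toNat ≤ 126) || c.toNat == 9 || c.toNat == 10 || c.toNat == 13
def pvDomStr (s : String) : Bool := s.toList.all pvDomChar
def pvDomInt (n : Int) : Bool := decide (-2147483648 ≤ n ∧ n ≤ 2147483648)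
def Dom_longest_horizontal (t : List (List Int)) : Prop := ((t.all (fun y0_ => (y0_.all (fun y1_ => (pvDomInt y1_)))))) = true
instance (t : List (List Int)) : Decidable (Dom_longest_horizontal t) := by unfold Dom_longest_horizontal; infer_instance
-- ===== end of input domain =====

-- B replaces A's running counter by the maximum gap between consecutive non-1 cell indices
-- per row (sentinels -1 and len(row)); alternative algorithm, same cost, return value only.

-- ===== PORT A =====
def longest_horizontal (t : List (List Int)) : Int :=
  t.foldl (fun max_length row =>
    (row.foldl (fun (s : Int × Int) cell =>
        if cell = 1 then (max s.1 (s.2 + 1), s.2 + 1) else (s.1, 0))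
      (max_length, 0)).1) 0

-- ===== PORT B =====
def longest_horizontal_alt (t : List (List Int)) : Int :=
  t.foldl (fun best row =>
    let bounds : List Int :=
      ((PySem.List.enumerate row).filter (fun p => p.2 ≠ 1)).map (fun p => p.1)
    (((-1 : Int) :: bounds).zip (bounds ++ [(row.length : Int)])).foldl
      (fun b p => max b (p.2 - p.1 - 1)) best) 0

-- ===== PRECONDITION & SPEC =====
def Spec_longest_horizontal (t : List (List Int)) (out : Int) : Prop := out = longest_horizontal_alt t
instance (t : List (List Int)) (out : Int) : Decidable (Spec_longest_horizontal t out) := by unfold Spec_longest_horizontal; infer_instance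

-- ===== CLAIM (what is proved, stated in full; the proofs are below) =====
def Claim_equal_longest_horizontal : Prop := ∀ (t : List (List Int)), Dom_longest_horizontal t → Spec_longest_horizontal t (longest_horizontal t)

-- ===== LEMMAS AND PROOFS =====

-- common spec of one row's contribution: longest run of 1s with a run of length c already open
def pvG (c : Int) : List Int → Int
  | [] => c
  | x :: xs => if x = 1 then pvG (c + 1) xs else max c (pvG 0 xs)

theorem pvG_ge (row : List Int) : ∀ c : Int, c ≤ pvG c row := by
  induction row with
  | nil => intro c; simp [pvG]
  | cons x xs ih =>
      intro c
      by_cases h : x = 1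
      · simpa [pvG, h] using le_trans (by omega) (ih (c + 1))
      · simp [pvG, h]

-- A's inner fold computes max of the carried max and pvG
theorem stepA (row : List Int) : ∀ (m c : Int), 0 ≤ c → c ≤ m →
    (row.foldl (fun (s : Int × Int) cell =>
        if cell = 1 then (max s.1 (s.2 + 1), s.2 + 1) else (s.1, 0)) (m, c)).1
      = max m (pvG c row) := by
  induction row with
  | nil => intro m c _ h; simp [pvG]; omega
  | cons x xs ih =>
      intro m c hc hm
      rw [List.foldl_cons]
      by_cases h : x = 1
      · rw [if_pos h, ih (max m (c + 1)) (c + 1) (by omega) (by omega)]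
        have hg := pvG_ge xs (c + 1)
        simp only [pvG, if_pos h]
        omega
      · rw [if_neg h, ih m 0 le_rfl (by omega)]
        simp only [pvG, if_neg h]
        omega

-- B side: the zipped boundary pairs, recursively
def pvPairs (prev i : Int) : List Int → List (Int × Int)
  | [] => [(prev, i)]
  | x :: xs => if x = 1 then pvPairs prev (i + 1) xs else (prev, i) :: pvPairs i (i + 1) xs

def pvBounds (i : Int) : List Int → List Int
  | [] => []
  | x :: xs => if x = 1 then pvBounds (i + 1) xs else i :: pvBounds (i + 1) xs

theorem bounds_enum (row : List Int) : ∀ i : Int,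
    ((PySem.List.enumerate row i).filter (fun p => p.2 ≠ 1)).map (fun p => p.1)
      = pvBounds i row := by
  induction row with
  | nil => intro i; simp [PySem.List.enumerate_nil, pvBounds]
  | cons x xs ih =>
      intro i
      by_cases h : x = 1
      · simpa [PySem.List.enumerate_cons, pvBounds, h] using ih (i + 1)
      · simpa [PySem.List.enumerate_cons, pvBounds, h] using ih (i + 1)

theorem zip_pairs (row : List Int) : ∀ prev i : Int,
    (prev :: pvBounds i row).zip (pvBounds i row ++ [i + row.length])
      = pvPairs prev i row := by
  induction row with
  | nil => intro prev i; simp [pvBounds, pvPairs]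
  | cons x xs ih =>
      intro prev i
      by_cases h : x = 1
      · simp only [pvBounds, pvPairs, if_pos h, List.length_cons]
        push_cast
        rw [show i + ((xs.length : Int) + 1) = (i + 1) + (xs.length : Int) by ring]
        exact ih prev (i + 1)
      · simp only [pvBounds, pvPairs, if_neg h, List.length_cons, List.cons_append,
          List.zip_cons_cons]
        push_cast
        rw [show i + ((xs.length : Int) + 1) = (i + 1) + (xs.length : Int) by ring]
        exact congrArg _ (ih i (i + 1))

theorem stepB (row : List Int) : ∀ (prev i m : Int),
    (pvPairs prev i row).foldl (fun b p => max b (p.2 - p.1 - 1)) m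
      = max m (pvG (i - prev - 1) row) := by
  induction row with
  | nil => intro prev i m; simp [pvPairs, pvG]
  | cons x xs ih =>
      intro prev i m
      by_cases h : x = 1
      · simp only [pvPairs, if_pos h]
        rw [ih prev (i + 1) m, show i + 1 - prev - 1 = i - prev - 1 + 1 by ring]
        simp only [pvG, if_pos h]
      · simp only [pvPairs, if_neg h, List.foldl_cons]
        rw [ih i (i + 1) (max m (i - prev - 1)), show i + 1 - i - 1 = 0 by ring]
        simp only [pvG, if_neg h]
        omega

-- per-row agreement
theorem row_eq (row : List Int) (m : Int) (hm : 0 ≤ m) :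
    (row.foldl (fun (s : Int × Int) cell =>
        if cell = 1 then (max s.1 (s.2 + 1), s.2 + 1) else (s.1, 0)) (m, 0)).1
      = (((-1 : Int) :: pvBounds 0 row).zip (pvBounds 0 row ++ [(row.length : Int)])).foldl
          (fun b p => max b (p.2 - p.1 - 1)) m := by
  rw [stepA row m 0 le_rfl hm]
  have hz := zip_pairs row (-1) 0
  rw [show ((row.length : Int)) = 0 + (row.length : Int) by ring, hz,
    stepB row (-1) 0 m, show (0 : Int) - (-1) - 1 = 0 by ring]

theorem outer (t : List (List Int)) : ∀ m : Int, 0 ≤ m →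
    t.foldl (fun max_length row =>
      (row.foldl (fun (s : Int × Int) cell =>
          if cell = 1 then (max s.1 (s.2 + 1), s.2 + 1) else (s.1, 0))
        (max_length, 0)).1) m
    = t.foldl (fun best row =>
        let bounds : List Int :=
          ((PySem.List.enumerate row).filter (fun p => p.2 ≠ 1)).map (fun p => p.1)
        (((-1 : Int) :: bounds).zip (bounds ++ [(row.length : Int)])).foldl
          (fun b p => max b (p.2 - p.1 - 1)) best) m := by
  induction t with
  | nil => intro m _; rfl
  | cons row rest ih =>
      intro m hm
      simp only [List.foldl_cons]
      have hb : ((PySem.List.enumerate row).filter (fun p => p.2 ≠ 1)).map (fun p => p.1)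
          = pvBounds 0 row := bounds_enum row 0
      rw [hb, row_eq row m hm]
      apply ih
      -- the new accumulator is ≥ m ≥ 0
      rw [← row_eq row m hm, stepA row m 0 le_rfl hm]
      omega

-- ===== VERDICT (by name: the statement is the Claim_ definition above) =====
theorem longest_horizontal_spec : Claim_equal_longest_horizontal := by
  intro t _
  unfold Spec_longest_horizontal longest_horizontal longest_horizontal_alt
  exact outer t 0 le_rfl
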